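-- pv_equiv track=rewrite | github.com/vinniec/test_jupyter | tastiera.py | tasti_speculari_ascisse
-- ===== SOURCE A (Python) =====
-- def indice_tasto(tasto, layout):
--     """restituisce l'indice di un tasto presente (e non spazio) altrimenti None"""
--     if tasto != " " and tasto in layout:
--         linee = layout.splitlines()
--         c, l =  [(l.index(tasto), linee.index(l)) for l in linee if tasto in l][0]
--         return c,l
--     else:
--         return None
--
-- def tasto_indice(indice, layout):
--     """restituisce il tasto di un indice se valido (e non spazio) altrimenti None"""
--     tasto = None
--     c, l = indice
--     linee = layout.splitlines()
--     if 0 <= l < len(linee) and 0 <= c < len(linee[l]):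
--         tasto = linee[l][c]
--         tasto = tasto if tasto != " " else None
--     return tasto
--
-- def numero_complementare(base, numero):
--     """restituisce il complemento di un numero"""
--     return base-numero
--
-- def complemento_di_una_serie(serie, numero):
--     """restituisce il complemento di un numero rispetto al numero massimo di una lista"""
--     massimo = max(serie)
--     #~ complem = [numero_complementare(massimo, numero) for numero in serie]
--     return numero_complementare(massimo, numero)
--
-- def indice_speculare_ascisse(indice, layout):
--     """restituisce l'indice di un tasto complementatato in orizzontale"""
--     linee = layout.splitlines()
--     c, l = indice
--     lunghezze = [len(linea) for linea in linee]
--     c_compl = complemento_di_una_serie(lunghezze, c)-1 #gli indici partono da 0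
--     return c_compl, l
--
-- def tasti_speculari_ascisse(tasti, layout):
--     tasti_speculari = []
--     for tasto in tasti:
--         indice = indice_tasto(tasto, layout)
--         if indice:
--             indice_speculare = indice_speculare_ascisse(indice, layout)
--             tasto_speculare = tasto_indice(indice_speculare, layout)
--             if tasto_speculare:
--                 tasti_speculari.append(tasto_speculare)
--     return tasti_speculari
-- ===== SOURCE B (Python) =====
-- def tasti_speculari_ascisse(tasti, layout):
--     linee = layout.splitlines()
--     massimo = max((len(linea) for linea in linee), default=0)
--     tabella = {}
--     for linea in linee:
--         for c, ch in enumerate(linea):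
--             if ch != ' ' and ch not in tabella:
--                 mc = massimo - c - 1
--                 sp = linea[mc] if 0 <= mc < len(linea) else ' '
--                 tabella[ch] = None if sp == ' ' else sp
--     out = []
--     for tasto in tasti:
--         sp = tabella.get(tasto)
--         if sp is not None:
--             out.append(sp)
--     return out
-- ===== Notes on version B (the rewrite author's own statement) =====
-- stated objective: faster
-- what changed: A re-scans the whole layout for every character of tasti (split, filter lines, list.index, max of line lengths each time); B builds one char-to-mirrored-char dict in a single row-major pass over the layout (first occurrence wins, mirror column maxlen-1-c bounds-checked against the line) and then maps tasti through the dict in one pass.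
import Mathlib
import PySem

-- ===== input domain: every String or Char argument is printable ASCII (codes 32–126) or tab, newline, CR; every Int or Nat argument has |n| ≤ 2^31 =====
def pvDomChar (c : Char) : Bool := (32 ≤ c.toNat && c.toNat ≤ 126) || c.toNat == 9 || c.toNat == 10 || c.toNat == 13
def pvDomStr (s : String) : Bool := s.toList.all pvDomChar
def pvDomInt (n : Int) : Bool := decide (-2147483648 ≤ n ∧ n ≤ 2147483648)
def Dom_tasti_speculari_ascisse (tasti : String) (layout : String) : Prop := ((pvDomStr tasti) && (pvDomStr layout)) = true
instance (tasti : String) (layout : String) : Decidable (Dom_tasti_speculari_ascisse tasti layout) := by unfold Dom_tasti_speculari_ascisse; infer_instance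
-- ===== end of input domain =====

-- B replaces A's per-character re-scan of the whole keyboard layout by one precomputed
-- char → mirrored-char table (a dict built in a single row-major pass over the layout)
-- followed by one flat lookup pass over `tasti`.

-- ===== PORT A =====
-- `tasto` ranges over the characters of `tasti` (Python yields 1-char strings); the 1-char
-- substring tests `tasto in layout` / `tasto in l` and the 1-char `l.index(tasto)` are
-- ported with PySem.Chars.isIn / PySem.Chars.find on the singleton [tasto] — exact there.
def indice_tasto (tasto : Char) (layout : String) : Option (Int × Int) :=
  if tasto ≠ ' ' ∧ PySem.Chars.isIn [tasto] layout.toList then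
    let linee := PySem.Chars.splitlines layout.toList
    let cands := (linee.filter (fun l => PySem.Chars.isIn [tasto] l)).map
      (fun l => (PySem.Chars.find l [tasto], (((PySem.List.index? linee l).getD 0 : Nat) : Int)))
      -- linee.index(l): l is drawn from linee, so index? is some (ValueError unreachable)
    match PySem.List.pyGet? cands 0 with
    | some cl => some cl
    | none => none  -- [0] on the empty list: Python raises IndexError here (outside Pre_)
  else none


def tasto_indice (indice : Int × Int) (layout : String) : Option Char :=
  let c := indice.1
  let l := indice.2
  let linee := PySem.Chars.splitlines layout.toList
  if 0 ≤ l ∧ l < (linee.length : Int) then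
    match PySem.List.pyGet? linee l with
    | some linea =>
      if 0 ≤ c ∧ c < (linea.length : Int) then
        match PySem.List.pyGet? linea c with
        | some t => if t ≠ ' ' then some t else none
        | none => none  -- unreachable: bounds just checked
      else none
    | none => none  -- unreachable: bounds just checked
  else none


def numero_complementare (base : Int) (numero : Int) : Int := base - numero


def complemento_di_una_serie (serie : List Int) (numero : Int) : Option Int :=
  match PySem.List.max? serie (fun x => x) with  -- max(serie); none = ValueError on [] (unreachable in A)
  | some massimo => some (numero_complementare massimo numero)
  | none => none


def indice_speculare_ascisse (indice : Int × Int) (layout : String) : Option (Int × Int) :=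
  let linee := PySem.Chars.splitlines layout.toList
  let c := indice.1
  let l := indice.2
  let lunghezze := linee.map (fun linea => (linea.length : Int))
  match complemento_di_una_serie lunghezze c with
  | some v => some (v - 1, l)
  | none => none


def tasti_speculari_ascisse (tasti : String) (layout : String) : List String :=
  tasti.toList.foldl (fun tasti_speculari tasto =>
    match indice_tasto tasto layout with
    | some indice =>
      match indice_speculare_ascisse indice layout with
      | some indice_speculare =>
        match tasto_indice indice_speculare layout with
        | some tasto_speculare => tasti_speculari ++ [String.ofList [tasto_speculare]]
        | none => tasti_speculari
      | none => tasti_speculari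
    | none => tasti_speculari) []



-- ===== PORT B =====
def tsa_tabella (linee : List (List Char)) (massimo : Int) : PySem.Dict Char (Option Char) :=
  linee.foldl (fun tabella linea =>
    (PySem.List.enumerate linea).foldl (fun tab p =>
      let c := p.1
      let ch := p.2
      if ch ≠ ' ' ∧ tab.contains ch = false then
        let mc := massimo - c - 1
        let sp := if 0 ≤ mc ∧ mc < (linea.length : Int) then (PySem.List.pyGet? linea mc).getD ' ' else ' '
        tab.insert ch (if sp = ' ' then none else some sp)
      else tab) tabella) PySem.Dict.empty


def tasti_speculari_ascisse_alt (tasti : String) (layout : String) : List String :=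
  let linee := PySem.Chars.splitlines layout.toList
  let massimo := PySem.List.maxD (linee.map (fun l => (l.length : Int))) (fun x => x) 0
  let tabella := tsa_tabella linee massimo
  tasti.toList.foldl (fun out tasto =>
    match tabella.get? tasto with
    | some (some sp) => out ++ [String.ofList [sp]]
    | _ => out) []

-- ===== PRECONDITION & SPEC =====
-- Pre_ excludes exactly the inputs on which Python A raises IndexError: a newline (or CR)
-- occurring both in `tasti` and in `layout` passes the `tasto in layout` test but lies on
-- no line of layout.splitlines(), so A's line-candidate list is empty and `[0]` raises.
def Pre_tasti_speculari_ascisse (tasti : String) (layout : String) : Prop :=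
  ¬ (('\n' ∈ tasti.toList ∧ '\n' ∈ layout.toList) ∨ ('\x0d' ∈ tasti.toList ∧ '\x0d' ∈ layout.toList))
instance (tasti : String) (layout : String) : Decidable (Pre_tasti_speculari_ascisse tasti layout) := by
  unfold Pre_tasti_speculari_ascisse; infer_instance

def pvWitness_tasti_speculari_ascisse : String × String := ("ba+", "abc\n cba")

def Spec_tasti_speculari_ascisse (tasti : String) (layout : String) (out : List String) : Prop :=
  out = tasti_speculari_ascisse_alt tasti layout
instance (tasti : String) (layout : String) (out : List String) : Decidable (Spec_tasti_speculari_ascisse tasti layout out) := by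
  unfold Spec_tasti_speculari_ascisse; infer_instance

-- ===== CLAIM (what is proved, stated in full; the proofs are below) =====
def Claim_equal_tasti_speculari_ascisse : Prop := ∀ (tasti : String) (layout : String), Dom_tasti_speculari_ascisse tasti layout → Pre_tasti_speculari_ascisse tasti layout → Spec_tasti_speculari_ascisse tasti layout (tasti_speculari_ascisse tasti layout)

-- ===== LEMMAS AND PROOFS =====

def tsaIsB (c : Char) : Bool :=
  decide (c.toNat = 10) || decide (c.toNat = 13) || decide (c.toNat = 11) || decide (c.toNat = 12) ||
  decide (c.toNat = 28) || decide (c.toNat = 29) || decide (c.toNat = 30) || decide (c.toNat = 133) ||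
  decide (c.toNat = 8232) || decide (c.toNat = 8233)


def tsaIdx (l : List Char) (ch : Char) : Int := (((PySem.List.index? l ch).getD 0 : Nat) : Int)


-- the value B's table stores for a character first seen at column c of `linea`
def tsaMirV (linea : List Char) (massimo : Int) (c : Int) : Option Char :=
  let mc := massimo - c - 1
  let sp := if 0 ≤ mc ∧ mc < (linea.length : Int) then (PySem.List.pyGet? linea mc).getD ' ' else ' '
  if sp = ' ' then none else some sp


-- characterisation of B's table: lookup of ch = mirror value at ch's first occurrence
def tsaSpec (linee : List (List Char)) (massimo : Int) (ch : Char) : Option (Option Char) :=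
  if ch = ' ' then none
  else (linee.find? (fun l => (PySem.List.index? l ch).isSome)).map
    (fun l => tsaMirV l massimo (tsaIdx l ch))


-- A's per-character computation, as one Option-valued function
def tsaOptA (layout : String) (t : Char) : Option Char :=
  match indice_tasto t layout with
  | some i =>
    match indice_speculare_ascisse i layout with
    | some j => tasto_indice j layout
    | none => none
  | none => none


theorem tsa_go_nil (isB : Char → Bool) (cur : List Char) (acc : List (List Char)) :
    PySem.Chars.splitlines.go isB [] cur acc = if cur.isEmpty then acc.reverse else (cur.reverse :: acc).reverse := by
  rw [PySem.Chars.splitlines.go.eq_def]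

theorem tsa_go_crlf (isB : Char → Bool) (rest cur : List Char) (acc : List (List Char)) :
    PySem.Chars.splitlines.go isB ('\x0d' :: '\n' :: rest) cur acc = PySem.Chars.splitlines.go isB rest [] (cur.reverse :: acc) := by
  rw [PySem.Chars.splitlines.go.eq_def]
  split
  · rename_i heq; simp at heq
  · rename_i r heq
    injection heq with h1 h2; injection h2 with h3 h4; subst h4; rfl
  · rename_i c r hx heq
    injection heq with h1 h2
    exact (hx rest h1.symm h2.symm).elim

theorem tsa_go_cons (isB : Char → Bool) (c : Char) (rest cur : List Char) (acc : List (List Char))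
    (hne : ∀ r, c = '\x0d' → rest = '\n' :: r → False) :
    PySem.Chars.splitlines.go isB (c :: rest) cur acc =
      if isB c then PySem.Chars.splitlines.go isB rest [] (cur.reverse :: acc)
      else PySem.Chars.splitlines.go isB rest (c :: cur) acc := by
  rw [PySem.Chars.splitlines.go.eq_def]
  split
  · rename_i heq; simp at heq
  · rename_i r heq
    injection heq with h1 h2
    exact (hne r h1 h2).elim
  · rename_i c' r hx heq
    injection heq with h1 h2; subst h1; subst h2; rfl



theorem tsa_go_mem_rev (isB : Char → Bool) (ch : Char) :
    ∀ (s cur : List Char) (acc : List (List Char)),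
      (∃ l ∈ PySem.Chars.splitlines.go isB s cur acc, ch ∈ l) →
        (ch ∈ s ∨ ch ∈ cur ∨ ∃ l ∈ acc, ch ∈ l) := by
  intro s cur acc
  induction s, cur, acc using PySem.Chars.splitlines.go.induct (isB := isB) with
  | case1 cur acc hcur =>
    rw [tsa_go_nil, if_pos hcur]
    rintro ⟨l, hl, hc⟩
    exact Or.inr (Or.inr ⟨l, List.mem_reverse.mp hl, hc⟩)
  | case2 cur acc hcur =>
    rw [tsa_go_nil, if_neg hcur]
    rintro ⟨l, hl, hc⟩
    rcases List.mem_cons.mp (List.mem_reverse.mp hl) with h | h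
    · exact Or.inr (Or.inl (List.mem_reverse.mp (h ▸ hc)))
    · exact Or.inr (Or.inr ⟨l, h, hc⟩)
  | case3 rest cur acc ih =>
    rw [tsa_go_crlf]
    intro h
    rcases ih h with h | h | ⟨l, hl, hc⟩
    · exact Or.inl (by simp [h])
    · simp at h
    · rcases List.mem_cons.mp hl with h' | h'
      · exact Or.inr (Or.inl (List.mem_reverse.mp (h' ▸ hc)))
      · exact Or.inr (Or.inr ⟨l, h', hc⟩)
  | case4 c rest cur acc hne hb ih =>
    rw [tsa_go_cons _ _ _ _ _ hne, if_pos hb]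
    intro h
    rcases ih h with h | h | ⟨l, hl, hc⟩
    · exact Or.inl (List.mem_cons_of_mem _ h)
    · simp at h
    · rcases List.mem_cons.mp hl with h' | h'
      · exact Or.inr (Or.inl (List.mem_reverse.mp (h' ▸ hc)))
      · exact Or.inr (Or.inr ⟨l, h', hc⟩)
  | case5 c rest cur acc hne hb ih =>
    rw [tsa_go_cons _ _ _ _ _ hne, if_neg hb]
    intro h
    rcases ih h with h | h | h
    · exact Or.inl (List.mem_cons_of_mem _ h)
    · rcases List.mem_cons.mp h with h' | h'
      · exact Or.inl (h' ▸ List.mem_cons_self)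
      · exact Or.inr (Or.inl h')
    · exact Or.inr (Or.inr h)


theorem tsa_go_mem_fwd (isB : Char → Bool) (ch : Char) (hB : isB ch = false)
    (hr : ch ≠ '\x0d') (hn : ch ≠ '\n') :
    ∀ (s cur : List Char) (acc : List (List Char)),
      (ch ∈ s ∨ ch ∈ cur ∨ ∃ l ∈ acc, ch ∈ l) →
        ∃ l ∈ PySem.Chars.splitlines.go isB s cur acc, ch ∈ l := by
  intro s cur acc
  induction s, cur, acc using PySem.Chars.splitlines.go.induct (isB := isB) with
  | case1 cur acc hcur =>
    rw [tsa_go_nil, if_pos hcur]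
    rintro (h | h | ⟨l, hl, hc⟩)
    · simp at h
    · rw [List.isEmpty_iff.mp hcur] at h; simp at h
    · exact ⟨l, List.mem_reverse.mpr hl, hc⟩
  | case2 cur acc hcur =>
    rw [tsa_go_nil, if_neg hcur]
    rintro (h | h | ⟨l, hl, hc⟩)
    · simp at h
    · exact ⟨cur.reverse, List.mem_reverse.mpr List.mem_cons_self, List.mem_reverse.mpr h⟩
    · exact ⟨l, List.mem_reverse.mpr (List.mem_cons_of_mem _ hl), hc⟩
  | case3 rest cur acc ih =>
    rw [tsa_go_crlf]
    rintro (h | h | ⟨l, hl, hc⟩)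
    · rcases List.mem_cons.mp h with h' | h'
      · exact (hr h').elim
      · rcases List.mem_cons.mp h' with h'' | h''
        · exact (hn h'').elim
        · exact ih (Or.inl h'')
    · exact ih (Or.inr (Or.inr ⟨cur.reverse, List.mem_cons_self, List.mem_reverse.mpr h⟩))
    · exact ih (Or.inr (Or.inr ⟨l, List.mem_cons_of_mem _ hl, hc⟩))
  | case4 c rest cur acc hne hb ih =>
    rw [tsa_go_cons _ _ _ _ _ hne, if_pos hb]
    rintro (h | h | ⟨l, hl, hc⟩)
    · rcases List.mem_cons.mp h with h' | h'
      · subst h'; rw [hB] at hb; simp at hb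
      · exact ih (Or.inl h')
    · exact ih (Or.inr (Or.inr ⟨cur.reverse, List.mem_cons_self, List.mem_reverse.mpr h⟩))
    · exact ih (Or.inr (Or.inr ⟨l, List.mem_cons_of_mem _ hl, hc⟩))
  | case5 c rest cur acc hne hb ih =>
    rw [tsa_go_cons _ _ _ _ _ hne, if_neg hb]
    rintro (h | h | ⟨l, hl, hc⟩)
    · rcases List.mem_cons.mp h with h' | h'
      · exact ih (Or.inr (Or.inl (h' ▸ List.mem_cons_self)))
      · exact ih (Or.inl h')
    · exact ih (Or.inr (Or.inl (List.mem_cons_of_mem _ h)))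
    · exact ih (Or.inr (Or.inr ⟨l, hl, hc⟩))

theorem tsa_enum_find (ch : Char) : ∀ (linea : List Char) (k : Int),
    (PySem.List.enumerate linea k).find? (fun p => p.2 == ch) =
      (PySem.List.index? linea ch).map (fun j => ((k + (j : Int)), ch)) := by
  intro linea
  induction linea with
  | nil => intro k; simp [PySem.List.enumerate, PySem.List.index?]
  | cons a rest ih =>
    intro k
    rw [PySem.List.enumerate_cons]
    by_cases ha : a = ch
    · subst ha
      rw [PySem.List.index?_cons_self]
      simp
    · rw [PySem.List.index?_cons_of_ne _ ha]
      rw [List.find?_cons_of_neg (by simp [ha])]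
      rw [ih (k+1)]
      cases PySem.List.index? rest ch <;> simp
      ring_nf


theorem tsa_cells (linea : List Char) (massimo : Int) (ch : Char) :
    ∀ (cells : List (Int × Char)) (tab : PySem.Dict Char (Option Char)),
      ((cells.foldl (fun tab p =>
        let c := p.1
        let ch := p.2
        if ch ≠ ' ' ∧ tab.contains ch = false then
          let mc := massimo - c - 1
          let sp := if 0 ≤ mc ∧ mc < (linea.length : Int) then (PySem.List.pyGet? linea mc).getD ' ' else ' '
          tab.insert ch (if sp = ' ' then none else some sp)
        else tab) tab).get? ch) =
      match tab.get? ch with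
      | some v => some v
      | none => if ch = ' ' then none
                else (cells.find? (fun p => p.2 == ch)).map (fun p => tsaMirV linea massimo p.1) := by
  intro cells
  induction cells with
  | nil =>
    intro tab
    simp only [List.foldl_nil, List.find?_nil, Option.map_none]
    cases tab.get? ch <;> simp
  | cons p rest ih =>
    intro tab
    rw [List.foldl_cons, ih]
    by_cases hsp : p.2 = ' '
    · have hguard : ¬ (p.2 ≠ ' ' ∧ tab.contains p.2 = false) := by simp [hsp]
      simp only [if_neg hguard]
      by_cases hch : ch = ' '
      · cases tab.get? ch <;> simp [hch]
      · rw [List.find?_cons_of_neg (by simp; intro hc; exact absurd (hc ▸ hsp) hch)]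
    · by_cases hcont : tab.contains p.2 = true
      · have hguard : ¬ (p.2 ≠ ' ' ∧ tab.contains p.2 = false) := by simp [hcont]
        simp only [if_neg hguard]
        by_cases hpc : p.2 = ch
        · obtain ⟨v, hv⟩ := Option.isSome_iff_exists.mp ((PySem.Dict.contains_eq_isSome_get? tab p.2) ▸ hcont)
          rw [hpc] at hv
          simp [hv]
        · rw [List.find?_cons_of_neg (by simp [hpc])]
      · have hguard : (p.2 ≠ ' ' ∧ tab.contains p.2 = false) := ⟨hsp, by simpa using hcont⟩
        rw [if_pos hguard]
        by_cases hpc : p.2 = ch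
        · have hnone : tab.get? ch = none := by
            rw [← hpc]
            cases h : tab.get? p.2 with
            | none => rfl
            | some v => rw [PySem.Dict.contains_eq_isSome_get?, h] at hcont; simp at hcont
          rw [hnone]
          have : (tab.insert p.2 (if (if 0 ≤ massimo - p.1 - 1 ∧ massimo - p.1 - 1 < (linea.length : Int) then (PySem.List.pyGet? linea (massimo - p.1 - 1)).getD ' ' else ' ') = ' ' then none else some ((if 0 ≤ massimo - p.1 - 1 ∧ massimo - p.1 - 1 < (linea.length : Int) then (PySem.List.pyGet? linea (massimo - p.1 - 1)).getD ' ' else ' ')))).get? ch = some (tsaMirV linea massimo p.1) := by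
            rw [← hpc, PySem.Dict.get?_insert_self]
            rfl
          rw [this]
          rw [List.find?_cons_of_pos (by simp [hpc])]
          simp [← hpc, hsp]
        · have : ∀ v, (tab.insert p.2 v).get? ch = tab.get? ch := fun v =>
            PySem.Dict.get?_insert_of_ne tab v (fun h => hpc h.symm)
          rw [this]
          rw [List.find?_cons_of_neg (by simp [hpc])]


theorem tsa_lines (massimo : Int) (ch : Char) :
    ∀ (linee : List (List Char)) (tab : PySem.Dict Char (Option Char)),
      ((linee.foldl (fun tabella linea =>
        (PySem.List.enumerate linea).foldl (fun tab p =>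
          let c := p.1
          let ch := p.2
          if ch ≠ ' ' ∧ tab.contains ch = false then
            let mc := massimo - c - 1
            let sp := if 0 ≤ mc ∧ mc < (linea.length : Int) then (PySem.List.pyGet? linea mc).getD ' ' else ' '
            tab.insert ch (if sp = ' ' then none else some sp)
          else tab) tabella) tab).get? ch) =
      match tab.get? ch with
      | some v => some v
      | none => tsaSpec linee massimo ch := by
  intro linee
  induction linee with
  | nil =>
    intro tab
    simp only [List.foldl_nil, tsaSpec, List.find?_nil, Option.map_none]
    cases tab.get? ch <;> simp
  | cons linea rest ih =>
    intro tab
    rw [List.foldl_cons, ih, tsa_cells, tsa_enum_find]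
    by_cases hch : ch = ' '
    · simp only [tsaSpec, if_pos hch]
      cases tab.get? ch <;> simp
    · simp only [tsaSpec, if_neg hch]
      cases hidx : PySem.List.index? linea ch with
      | some j =>
        have hidx' : List.idxOf? ch linea = some j := by
          rw [← PySem.List.index?_eq_idxOf?]; exact hidx
        rw [List.find?_cons_of_pos (by simp [hidx'])]
        cases tab.get? ch <;> simp [tsaIdx, hidx']
      | none =>
        have hidx' : List.idxOf? ch linea = none := by
          rw [← PySem.List.index?_eq_idxOf?]; exact hidx
        rw [List.find?_cons_of_neg (by simp [hidx'])]
        cases tab.get? ch <;> simp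


theorem tsa_tabella_get (linee : List (List Char)) (massimo : Int) (ch : Char) :
    (tsa_tabella linee massimo).get? ch = tsaSpec linee massimo ch := by
  unfold tsa_tabella
  rw [tsa_lines]
  rw [PySem.Dict.get?_empty]


theorem tsa_singleton_prefix (l : List Char) (t : Char) (i : Nat) (h : i < l.length) :
    [t] <+: l.drop i ↔ l[i] = t := by
  rw [List.drop_eq_getElem_cons h]
  constructor
  · rintro ⟨s, hs⟩; injection hs with h1 _; exact h1.symm
  · intro hg; exact ⟨l.drop (i+1), by rw [hg]; rfl⟩


theorem tsa_find_singleton (l : List Char) (t : Char) (hm : t ∈ l) :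
    PySem.Chars.find l [t] = tsaIdx l t := by
  obtain ⟨k, hk⟩ := Option.isSome_iff_exists.mp ((PySem.List.index?_isSome_iff l t).mpr hm)
  obtain ⟨hklt, hget, hmin⟩ := PySem.List.getElem_of_index?_eq_some hk
  have hnn : 0 ≤ PySem.Chars.find l [t] :=
    (PySem.Chars.find_nonneg_iff l [t]).mpr ((List.singleton_infix_iff t l).mpr hm)
  obtain ⟨hpre, hmin2⟩ := PySem.Chars.find_spec hnn
  have hflt : (PySem.Chars.find l [t]).toNat < l.length := by
    rcases hpre with ⟨s, hs⟩
    have := congrArg List.length hs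
    simp [List.length_drop] at this
    omega
  have hfk : (PySem.Chars.find l [t]).toNat = k := by
    rcases Nat.lt_trichotomy (PySem.Chars.find l [t]).toNat k with h | h | h
    · exact absurd ((tsa_singleton_prefix l t _ hflt).mp hpre) (hmin _ h)
    · exact h
    · exact absurd ((tsa_singleton_prefix l t k hklt).mpr hget) (hmin2 k h)
  have : PySem.Chars.find l [t] = ((PySem.Chars.find l [t]).toNat : Int) := (Int.toNat_of_nonneg hnn).symm
  rw [this, hfk, tsaIdx, hk]
  rfl


theorem tsa_char_eq_of_toNat (a b : Char) (h : a.toNat = b.toNat) : a = b :=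
  Char.ext (UInt32.toNat_inj.mp h)


theorem tsa_pyGet?_zero {a : Type} (xs : List a) : PySem.List.pyGet? xs 0 = xs.head? := by
  cases xs <;> simp [PySem.List.pyGet?, PySem.List.pyIdx?]


theorem tsa_splitlines_eq (s : List Char) :
    PySem.Chars.splitlines s = PySem.Chars.splitlines.go tsaIsB s [] [] := rfl


theorem tsa_isB_false (t : Char) (hdom : pvDomChar t = true) (h10 : t ≠ '\n') (h13 : t ≠ '\x0d') :
    tsaIsB t = false := by
  have h10' : t.toNat ≠ 10 := fun h => h10 (tsa_char_eq_of_toNat _ _ (by rw [h]; rfl))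
  have h13' : t.toNat ≠ 13 := fun h => h13 (tsa_char_eq_of_toNat _ _ (by rw [h]; rfl))
  simp [pvDomChar] at hdom
  simp [tsaIsB]
  omega


theorem tsa_isIn_singleton (t : Char) (l : List Char) :
    PySem.Chars.isIn [t] l = (PySem.List.index? l t).isSome := by
  by_cases h : t ∈ l
  · rw [(PySem.Chars.isIn_iff_infix _ _).mpr ((List.singleton_infix_iff _ _).mpr h),
      (PySem.List.index?_isSome_iff l t).mpr h]
  · have hA : PySem.Chars.isIn [t] l = false := by
      cases hb : PySem.Chars.isIn [t] l
      · rfl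
      · exact absurd ((List.singleton_infix_iff _ _).mp ((PySem.Chars.isIn_iff_infix _ _).mp hb)) h
    have hB : (PySem.List.index? l t).isSome = false := by
      cases hb : (PySem.List.index? l t).isSome
      · rfl
      · exact absurd ((PySem.List.index?_isSome_iff l t).mp hb) h
    rw [hA, hB]

theorem tsa_stepA (layout : String) (t : Char) (hdomt : pvDomChar t = true)
    (h10 : t = '\n' → t ∉ layout.toList) (h13 : t = '\x0d' → t ∉ layout.toList) :
    tsaOptA layout t =
      match tsaSpec (PySem.Chars.splitlines layout.toList)
          (PySem.List.maxD ((PySem.Chars.splitlines layout.toList).map (fun l => (l.length : Int))) (fun x => x) 0) t with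
      | some (some sp) => some sp
      | _ => none := by
  set L := PySem.Chars.splitlines layout.toList with hL
  set M := PySem.List.maxD (L.map (fun l => (l.length : Int))) (fun x => x) 0 with hM
  by_cases hsp : t = ' '
  · have hIT : indice_tasto t layout = none := by
      unfold indice_tasto
      rw [if_neg (by simp [hsp])]
    unfold tsaOptA
    rw [hIT]
    simp [tsaSpec, hsp]
  · by_cases hin : t ∈ layout.toList
    · have h10' : t ≠ '\n' := fun h => h10 h hin
      have h13' : t ≠ '\x0d' := fun h => h13 h hin
      have hfwd : ∃ l ∈ L, t ∈ l := by
        rw [hL, tsa_splitlines_eq]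
        exact tsa_go_mem_fwd _ t (tsa_isB_false t hdomt h10' h13') h13' h10' _ _ _ (Or.inl hin)
      have hfsome : (L.find? (fun l => (PySem.List.index? l t).isSome)).isSome := by
        rw [List.find?_isSome]
        obtain ⟨l, hl, htl⟩ := hfwd
        exact ⟨l, hl, (PySem.List.index?_isSome_iff l t).mpr htl⟩
      obtain ⟨line₁, hfind⟩ := Option.isSome_iff_exists.mp hfsome
      have hline₁L : line₁ ∈ L := List.mem_of_find?_eq_some hfind
      have htl₁ : t ∈ line₁ := by simpa using List.find?_some hfind
      obtain ⟨k, hk⟩ := Option.isSome_iff_exists.mp ((PySem.List.index?_isSome_iff line₁ t).mpr htl₁)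
      obtain ⟨hklt, hkget, _⟩ := PySem.List.getElem_of_index?_eq_some hk
      obtain ⟨l₁, hl₁⟩ := Option.isSome_iff_exists.mp ((PySem.List.index?_isSome_iff L line₁).mpr hline₁L)
      obtain ⟨hl₁lt, hl₁get, _⟩ := PySem.List.getElem_of_index?_eq_some hl₁
      have hpredeq : (fun l => PySem.Chars.isIn [t] l) = (fun l => (PySem.List.index? l t).isSome) :=
        funext (fun l => tsa_isIn_singleton t l)
      have hIsIn : PySem.Chars.isIn [t] layout.toList = true :=
        (PySem.Chars.isIn_iff_infix _ _).mpr ((List.singleton_infix_iff _ _).mpr hin)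
      have hIT : indice_tasto t layout = some (tsaIdx line₁ t, ((l₁ : Nat) : Int)) := by
      -- A picks the first line containing t; linee.index re-finds (an equal) line
        unfold indice_tasto
        rw [if_pos ⟨hsp, hIsIn⟩]
        simp only [← hL]
        rw [tsa_pyGet?_zero, List.head?_map, List.head?_filter, hpredeq, hfind]
        simp only [Option.map_some]
        rw [tsa_find_singleton _ _ htl₁, hl₁]
        rfl
      have hnil : L ≠ [] := List.ne_nil_of_mem hline₁L
      have hmax : PySem.List.max? (L.map (fun l => (l.length : Int))) (fun x => x) = some M :=
        hM ▸ PySem.List.max?_eq_some_maxD _ _ 0 (by simp [hnil])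
      have hISA : indice_speculare_ascisse (tsaIdx line₁ t, ((l₁ : Nat) : Int)) layout =
          some (M - tsaIdx line₁ t - 1, ((l₁ : Nat) : Int)) := by
        unfold indice_speculare_ascisse complemento_di_una_serie numero_complementare
        simp only [← hL, hmax]
      have hlenle : (line₁.length : Int) ≤ M :=
        PySem.List.max?_isMax hmax _ (List.mem_map_of_mem hline₁L)
      have hidx : tsaIdx line₁ t = (k : Int) := by rw [tsaIdx, hk]; rfl
      have hgetL : PySem.List.pyGet? L ((l₁ : Nat) : Int) = some line₁ := by
        rw [PySem.List.pyGet?_natCast, List.getElem?_eq_getElem hl₁lt, hl₁get]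
      simp only [tsaOptA, hIT, hISA]
      unfold tasto_indice
      simp only [← hL]
      rw [if_pos ⟨by positivity, by exact_mod_cast hl₁lt⟩]
      have hRHS : tsaSpec L M t = some (tsaMirV line₁ M (tsaIdx line₁ t)) := by
        rw [tsaSpec, if_neg hsp, hfind]; rfl
      rw [hRHS, hidx]
      simp only [hgetL, tsaMirV]
      by_cases hbound : (M - (k : Int) - 1) < (line₁.length : Int)
      · have h0 : (0 : Int) ≤ M - (k : Int) - 1 := by omega
        have hlt : (M - (k : Int) - 1).toNat < line₁.length := by omega
        have htn : (M - (k : Int) - 1) = (((M - (k : Int) - 1).toNat : Nat) : Int) := by omega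
        have hpg : PySem.List.pyGet? line₁ (M - (k : Int) - 1) = line₁[(M - (k : Int) - 1).toNat]? := by
          conv_lhs => rw [htn]
          rw [PySem.List.pyGet?_natCast]
        have hc : (0 ≤ M - (k : Int) - 1 ∧ M - (k : Int) - 1 < (line₁.length : Int)) := ⟨h0, hbound⟩
        simp only [hpg, List.getElem?_eq_getElem hlt, if_pos hc, Option.getD_some]
        split <;> rename_i hv <;> simp at hv <;> simp [hv]
      · have hc : ¬(0 ≤ M - (k : Int) - 1 ∧ M - (k : Int) - 1 < (line₁.length : Int)) := fun hc => hbound hc.2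
        simp only [if_neg hc]
        simp
    · have hIsIn : PySem.Chars.isIn [t] layout.toList = false := by
        cases hb : PySem.Chars.isIn [t] layout.toList
        · rfl
        · exact absurd ((List.singleton_infix_iff _ _).mp ((PySem.Chars.isIn_iff_infix _ _).mp hb)) hin
      have hIT : indice_tasto t layout = none := by
        unfold indice_tasto
        rw [if_neg (by rw [hIsIn]; simp)]
      have hnofind : L.find? (fun l => (PySem.List.index? l t).isSome) = none := by
        rw [List.find?_eq_none]
        intro l hl hp
        apply hin
        have hrev := tsa_go_mem_rev tsaIsB t layout.toList [] []
          ⟨l, by rw [← tsa_splitlines_eq, ← hL]; exact hl, (PySem.List.index?_isSome_iff l t).mp (by simpa using hp)⟩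
        rcases hrev with h | h | h
        · exact h
        · simp at h
        · simp at h
      unfold tsaOptA
      rw [hIT]
      simp only [tsaSpec]
      rw [if_neg hsp, hnofind]
      rfl

theorem tsa_bodyA (layout : String) (t : Char) (acc : List String) :
    (match indice_tasto t layout with
     | some indice =>
       match indice_speculare_ascisse indice layout with
       | some indice_speculare =>
         match tasto_indice indice_speculare layout with
         | some tasto_speculare => acc ++ [String.ofList [tasto_speculare]]
         | none => acc
       | none => acc
     | none => acc)
    = acc ++ (match tsaOptA layout t with | some c => [String.ofList [c]] | none => []) := by
  rw [tsaOptA]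
  cases hI : indice_tasto t layout with
  | none => simp
  | some i =>
    cases hJ : indice_speculare_ascisse i layout with
    | none => simp [hJ]
    | some j => cases hT : tasto_indice j layout <;> simp [hJ, hT]

theorem tasti_speculari_ascisse_eq (tasti layout : String)
    (hdom : Dom_tasti_speculari_ascisse tasti layout)
    (hpre : Pre_tasti_speculari_ascisse tasti layout) :
    tasti_speculari_ascisse tasti layout = tasti_speculari_ascisse_alt tasti layout := by
  unfold tasti_speculari_ascisse tasti_speculari_ascisse_alt
  refine PySem.List.foldl_congr_mem _ _ _ _ ?_
  intro acc t ht
  have hdomt : pvDomChar t = true := by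
    unfold Dom_tasti_speculari_ascisse at hdom
    have h1 : pvDomStr tasti = true := (Bool.and_eq_true _ _).mp hdom |>.1
    simp only [pvDomStr, List.all_eq_true] at h1
    simpa using h1 t ht
  have h10 : t = '\n' → t ∉ layout.toList := fun h hmem => hpre (Or.inl ⟨h ▸ ht, h ▸ hmem⟩)
  have h13 : t = '\x0d' → t ∉ layout.toList := fun h hmem => hpre (Or.inr ⟨h ▸ ht, h ▸ hmem⟩)
  rw [tsa_bodyA, tsa_stepA layout t hdomt h10 h13, tsa_tabella_get]
  cases hS : tsaSpec (PySem.Chars.splitlines layout.toList)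
      (PySem.List.maxD ((PySem.Chars.splitlines layout.toList).map (fun l => (l.length : Int))) (fun x => x) 0) t with
  | none => simp
  | some v => cases v <;> simp

-- ===== VERDICT (by name: the statement is the Claim_ definition above) =====
theorem tasti_speculari_ascisse_spec : Claim_equal_tasti_speculari_ascisse := by
  intro tasti layout hdom hpre
  unfold Spec_tasti_speculari_ascisse
  exact tasti_speculari_ascisse_eq tasti layout hdom hpre
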